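-- pv_equiv track=rewrite | github.com/hoangquocvietuet/OpenTwin | score_and_chunk.py | group_by_thread
-- ===== SOURCE A (Python) =====
-- def group_by_thread(messages: list[dict]) -> dict[str, list[dict]]:
--     threads = {}
--     for msg in messages:
--         tid = msg["thread_id"]
--         if tid not in threads:
--             threads[tid] = []
--         threads[tid].append(msg)
--     # sort each thread by timestamp
--     for tid in threads:
--         threads[tid].sort(key=lambda m: m.get("timestamp") or "")
--     return threads
-- ===== SOURCE B (Python) =====
-- def group_by_thread(messages: list[dict]) -> dict[str, list[dict]]:
--     ids = []
--     for m in messages: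
--         t = m["thread_id"]
--         if t not in ids:
--             ids.append(t)
--     return {t: sorted((m for m in messages if m["thread_id"] == t),
--                       key=lambda m: m.get("timestamp") or "")
--             for t in ids}
-- ===== Notes on version B (the rewrite author's own statement) =====
-- stated objective: alternative
-- what changed: Replaces A's single-pass dict-of-lists accumulation with in-place per-key sorts by a declarative two-stage form: collect distinct thread ids in first-occurrence order, then build the result as a comprehension that filters and sorts each thread's messages directly from the input list.
import Mathlib
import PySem

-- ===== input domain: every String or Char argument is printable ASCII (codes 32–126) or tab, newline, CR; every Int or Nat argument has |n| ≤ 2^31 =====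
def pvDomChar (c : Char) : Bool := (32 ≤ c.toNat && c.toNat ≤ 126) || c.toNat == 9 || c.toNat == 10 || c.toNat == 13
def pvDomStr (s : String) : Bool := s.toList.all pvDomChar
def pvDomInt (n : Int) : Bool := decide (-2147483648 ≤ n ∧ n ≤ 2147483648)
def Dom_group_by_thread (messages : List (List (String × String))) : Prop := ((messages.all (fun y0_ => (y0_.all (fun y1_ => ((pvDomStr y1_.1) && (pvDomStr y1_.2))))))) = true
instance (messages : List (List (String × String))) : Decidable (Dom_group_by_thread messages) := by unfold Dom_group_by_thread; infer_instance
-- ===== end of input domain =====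

-- B replaces A's single-pass dict-of-lists accumulation with per-key in-place sorts by a two-stage
-- declarative form: distinct thread ids in first-occurrence order, then filter-and-sort per id
-- (same return value; no speed claim). A mutates only its own fresh dict, so no caller-visible
-- mutation is at stake: the equivalence is about the return value.

-- ===== PORT A =====
-- msg["thread_id"]: KeyError when absent is excluded by Pre_; on Pre_ the lookup is `some`, so getD "" is exact.
def pvTid (m : List (String × String)) : String :=
  ((PySem.Dict.mk m).get? "thread_id").getD ""

-- key=lambda m: m.get("timestamp") or "" — `or ""` returns "" for a missing key and for the falsy "".
def pvKeyTs (m : List (String × String)) : String :=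
  let t := ((PySem.Dict.mk m).get? "timestamp").getD ""
  if t = "" then "" else t

def group_by_thread (messages : List (List (String × String))) : List (String × List (List (String × String))) :=
  -- first loop: insert [] for unseen thread ids, then append msg (list append in place = modify)
  let threads := messages.foldl
    (fun (d : PySem.Dict String (List (List (String × String)))) msg =>
      let tid := pvTid msg
      let d := if d.contains tid then d else d.insert tid []
      d.modify tid [] (fun l => l ++ [msg]))
    PySem.Dict.empty
  -- second loop: for tid in threads: threads[tid].sort(key=…) (in-place sort = modify)
  let threads := threads.keys.foldl
    (fun d tid => d.modify tid [] (fun l => PySem.List.sorted l pvKeyTs)) threads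
  threads.items

-- ===== PORT B =====
def group_by_thread_alt (messages : List (List (String × String))) : List (String × List (List (String × String))) :=
  -- ids = []; for m in messages: if m["thread_id"] not in ids: ids.append(...)  — exactly PySem.Set.add
  let ids : PySem.Set String :=
    messages.foldl (fun acc m => PySem.Set.add acc (pvTid m)) PySem.Set.empty
  -- {t: sorted((m for m in messages if m["thread_id"] == t), key=…) for t in ids}
  (ids.foldl
    (fun (d : PySem.Dict String (List (List (String × String)))) t =>
      d.insert t (PySem.List.sorted (messages.filter (fun m => pvTid m == t)) pvKeyTs))
    PySem.Dict.empty).items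

-- ===== PRECONDITION & SPEC =====
-- Pre_ excludes exactly the inputs where some message lacks the "thread_id" key: there A (and B) raise KeyError.
def Pre_group_by_thread (messages : List (List (String × String))) : Prop :=
  (messages.all (fun m => (PySem.Dict.mk m).contains "thread_id")) = true
instance (messages : List (List (String × String))) : Decidable (Pre_group_by_thread messages) := by unfold Pre_group_by_thread; infer_instance

def pvWitness_group_by_thread : (List (List (String × String))) :=
  [[("thread_id", "a"), ("timestamp", "2")],
   [("thread_id", "b")],
   [("thread_id", "a"), ("timestamp", "1")]]

def Spec_group_by_thread (messages : List (List (String × String))) (out : List (String × List (List (String × String)))) : Prop := out = group_by_thread_alt messages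
instance (messages : List (List (String × String))) (out : List (String × List (List (String × String)))) : Decidable (Spec_group_by_thread messages out) := by unfold Spec_group_by_thread; infer_instance

-- ===== CLAIM (what is proved, stated in full; the proofs are below) =====
def Claim_equal_group_by_thread : Prop := ∀ (messages : List (List (String × String))), Dom_group_by_thread messages → Pre_group_by_thread messages → Spec_group_by_thread messages (group_by_thread messages)

-- ===== LEMMAS AND PROOFS =====

-- A's loop body (seed-if-absent, then append) is exactly one modify
theorem pv_stepA_eq (d : PySem.Dict String (List (List (String × String)))) (m : List (String × String)) :
    (if d.contains (pvTid m) then d else d.insert (pvTid m) []).modify (pvTid m) [] (fun l => l ++ [m])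
      = d.modify (pvTid m) [] (fun l => l ++ [m]) := by
  split_ifs with h
  · rfl
  · simp only [Bool.not_eq_true] at h
    simp [PySem.Dict.modify, PySem.Dict.getD_insert_self, PySem.Dict.insert_insert_self,
      PySem.Dict.getD_of_not_contains _ _ h]

theorem pv_foldA_eq (msgs : List (List (String × String))) :
    ∀ d : PySem.Dict String (List (List (String × String))),
    msgs.foldl (fun d msg =>
        let tid := pvTid msg
        let d := if d.contains tid then d else d.insert tid []
        d.modify tid [] (fun l => l ++ [msg])) d
      = msgs.foldl (fun d msg => d.modify (pvTid msg) [] (fun l => l ++ [msg])) d := by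
  induction msgs with
  | nil => intro d; rfl
  | cons m ms ih =>
    intro d
    simp only [List.foldl_cons]
    rw [show (let tid := pvTid m
              let d' := if d.contains tid then d else d.insert tid []
              d'.modify tid [] (fun l => l ++ [m])) = d.modify (pvTid m) [] (fun l => l ++ [m])
          from pv_stepA_eq d m]
    exact ih _

theorem pv_getD_group (msgs : List (List (String × String)))
    (d : PySem.Dict String (List (List (String × String)))) (c : String) :
    (msgs.foldl (fun d msg => d.modify (pvTid msg) [] (fun l => l ++ [msg])) d).getD c []
      = d.getD c [] ++ msgs.filter (fun m => pvTid m == c) := by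
  have h := PySem.Dict.getD_foldl_modify_append (msgs.map (fun m => (pvTid m, m))) d c
  rw [List.foldl_map] at h
  simpa [List.filter_map, List.map_map, Function.comp_def] using h

theorem pv_getD_sortloop (g : List (List (String × String)) -> List (List (String × String)))
    (c : String) :
    ∀ (ks : List String) (d : PySem.Dict String (List (List (String × String)))), ks.Nodup →
    (ks.foldl (fun d k => d.modify k [] g) d).getD c []
      = if c ∈ ks then g (d.getD c []) else d.getD c [] := by
  intro ks
  induction ks with
  | nil => intro d _; simp
  | cons k ks ih =>
    intro d hnd
    rw [List.nodup_cons] at hnd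
    simp only [List.foldl_cons]
    rw [ih _ hnd.2]
    by_cases hc : c = k
    · subst hc
      simp [hnd.1, PySem.Dict.modify]
    · simp [PySem.Dict.modify, PySem.Dict.getD_insert, hc]

theorem pv_update_eq_self {A : Type} [BEq A] [LawfulBEq A] :
    ∀ (l : List A) (s : PySem.Set A), (∀ x ∈ l, x ∈ s) → PySem.Set.update s l = s := by
  intro l
  induction l with
  | nil => intro s _; rfl
  | cons x l ih =>
    intro s hs
    have hx : x ∈ s := hs x (List.mem_cons_self ..)
    show PySem.Set.update (s.add x) l = s
    rw [show s.add x = s by simp [PySem.Set.add, List.contains_eq_mem, hx]]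
    exact ih s (fun y hy => hs y (List.mem_cons_of_mem _ hy))

-- ===== VERDICT (by name: the statement is the Claim_ definition above) =====
theorem group_by_thread_spec : Claim_equal_group_by_thread := by
  intro msgs _ _
  unfold Spec_group_by_thread group_by_thread group_by_thread_alt
  simp only []
  rw [pv_foldA_eq]
  -- A's dict after the grouping loop
  set d1 := msgs.foldl (fun d msg => d.modify (pvTid msg) [] (fun l => l ++ [msg]))
      (PySem.Dict.empty : PySem.Dict String (List (List (String × String)))) with hd1
  have hK1 : d1.keys = PySem.Set.update [] (msgs.map pvTid) := by
    simpa using PySem.Dict.keys_foldl_modify_key msgs pvTid [] (fun _ msg => fun l => l ++ [msg]) PySem.Dict.empty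
  have hNd1 : d1.keys.Nodup :=
    PySem.Dict.nodup_keys_foldl_modify_key msgs pvTid [] (fun _ msg => fun l => l ++ [msg]) _ PySem.Dict.nodup_keys_empty
  set dA := d1.keys.foldl (fun d tid => d.modify tid [] (fun l => PySem.List.sorted l pvKeyTs)) d1 with hdA
  have hKA : dA.keys = d1.keys := by
    rw [hdA, PySem.Dict.keys_foldl_modify_key d1.keys (fun k => k) [] (fun _ _ => fun l => PySem.List.sorted l pvKeyTs) d1]
    simp only [List.map_id']
    exact pv_update_eq_self _ _ (fun x hx => hx)
  have hNdA : dA.keys.Nodup := hKA ▸ hNd1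
  -- B's id list is the same first-occurrence list as A's key list
  have hIds : msgs.foldl (fun acc m => PySem.Set.add acc (pvTid m)) PySem.Set.empty
      = PySem.Set.update [] (msgs.map pvTid) := by
    simp [PySem.Set.update, PySem.Set.empty, List.foldl_map]
  -- B's comprehension over distinct fresh ids appends its pairs in order
  have hB : (PySem.Set.update ([] : List String) (msgs.map pvTid)).foldl
        (fun (d : PySem.Dict String (List (List (String × String)))) t =>
          d.insert t (PySem.List.sorted (msgs.filter (fun m => pvTid m == t)) pvKeyTs))
        PySem.Dict.empty
      = PySem.Dict.mk ((PySem.Set.update ([] : List String) (msgs.map pvTid)).map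
          (fun t => (t, PySem.List.sorted (msgs.filter (fun m => pvTid m == t)) pvKeyTs))) := by
    apply PySem.Dict.ext
    rw [PySem.Dict.items_foldl_insert_fresh _ (fun t => t) _ _
          (by intro a _; simp) (by simpa using (hK1 ▸ hNd1))]
    simp [PySem.Dict.empty]
  rw [hIds, hB]
  rw [PySem.Dict.items_eq_map_keys dA hNdA [], hKA, hK1]
  refine List.map_congr_left ?_
  intro k hk
  have hA : dA.getD k [] = PySem.List.sorted (msgs.filter (fun m => pvTid m == k)) pvKeyTs := by
    rw [hdA, pv_getD_sortloop _ k d1.keys d1 hNd1]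
    rw [if_pos (show k ∈ d1.keys by rw [hK1]; exact hk)]
    rw [hd1, pv_getD_group msgs PySem.Dict.empty k]
    simp
  rw [hA]
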